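-- pv_equiv track=rewrite | github.com/hariharanragothaman/AlgoDSBits | BinarySearch/climbing_the_leader_board_hackerrank.py | reverse_bisect
-- ===== SOURCE A (Python) =====
-- def reverse_bisect(scores, value):
--     low, high = 0, len(scores)
--     while low < high:
--         mid = (low + high) // 2
--         if value > scores[mid]:
--             high = mid
--         else:
--             low = mid + 1
--     return low
-- ===== SOURCE B (Python) =====
-- def reverse_bisect(scores, value):
--     def go(lo, hi):
--         if lo >= hi:
--             return lo
--         mid = (lo + hi) // 2
--         return go(lo, mid) if value > scores[mid] else go(mid + 1, hi)
--     return go(0, len(scores))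
-- ===== Notes on version B (the rewrite author's own statement) =====
-- stated objective: simpler
-- what changed: The mutable low/high while-loop is replaced by a small recursive helper on the half-open window (lo, hi), returning directly from each branch with no mutable state.
import Mathlib
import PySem

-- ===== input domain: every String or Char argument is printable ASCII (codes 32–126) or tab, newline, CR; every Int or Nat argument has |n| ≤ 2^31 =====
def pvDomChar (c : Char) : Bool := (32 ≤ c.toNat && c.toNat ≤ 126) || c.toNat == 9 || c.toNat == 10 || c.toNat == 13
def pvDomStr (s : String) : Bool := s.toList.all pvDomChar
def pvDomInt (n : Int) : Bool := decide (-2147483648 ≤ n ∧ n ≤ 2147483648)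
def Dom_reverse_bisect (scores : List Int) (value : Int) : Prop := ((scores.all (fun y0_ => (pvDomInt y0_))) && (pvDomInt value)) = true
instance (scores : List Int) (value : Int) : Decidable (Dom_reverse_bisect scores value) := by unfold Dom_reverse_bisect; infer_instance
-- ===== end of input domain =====

-- B rewrites A's mutable low/high while-loop as a recursive helper on the window (lo, hi);
-- same value on every input; objective: simpler recursive decomposition, not faster.

-- ===== PORT A =====
-- A's while loop, state (low, high); fuel only makes the loop total (len+1 steps always suffice:
-- the window [low, high) shrinks every iteration); the 'none' branch is unreachable (low ≤ mid < high ≤ len)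
def revLoopA (scores : List Int) (value : Int) : Nat → Int → Int → Int
  | 0, low, _ => low
  | fuel + 1, low, high =>
    if low < high then
      let mid := PySem.Int.floordiv (low + high) 2
      match PySem.List.pyGet? scores mid with
      | some s => if value > s then revLoopA scores value fuel low mid
                  else revLoopA scores value fuel (mid + 1) high
      | none => low
    else low

def reverse_bisect (scores : List Int) (value : Int) : Int :=
  revLoopA scores value (scores.length + 1) 0 (scores.length : Int)

-- ===== PORT B =====
-- Source B's inner 'go(lo, hi)': indices are the Nat counters 0 ≤ lo, hi ≤ len, so '//' is Nat
-- division and scores[mid] is the plain in-range lookup (go keeps mid < hi ≤ len, so Python's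
-- scores[mid] never raises; getD's default is unreachable); recursion terminates as hi - lo shrinks
def goB (scores : List Int) (value : Int) (lo hi : Nat) : Int :=
  if lo ≥ hi then (lo : Int)
  else
    let mid := (lo + hi) / 2
    if value > scores.getD mid 0 then goB scores value lo mid
    else goB scores value (mid + 1) hi
termination_by hi - lo
decreasing_by all_goals omega

def reverse_bisect_alt (scores : List Int) (value : Int) : Int :=
  goB scores value 0 scores.length

-- ===== PRECONDITION & SPEC =====
def Spec_reverse_bisect (scores : List Int) (value : Int) (out : Int) : Prop := out = reverse_bisect_alt scores value
instance (scores : List Int) (value : Int) (out : Int) : Decidable (Spec_reverse_bisect scores value out) := by unfold Spec_reverse_bisect; infer_instance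

-- ===== CLAIM (what is proved, stated in full; the proofs are below) =====
def Claim_equal_reverse_bisect : Prop := ∀ (scores : List Int) (value : Int), Dom_reverse_bisect scores value → Spec_reverse_bisect scores value (reverse_bisect scores value)

-- ===== LEMMAS AND PROOFS =====

-- A's loop with window [lo, hi), hi ≤ len, computes B's go lo hi (all states reached are such casts)
theorem revLoopA_eq_goB (scores : List Int) (value : Int) (fuel lo hi : Nat)
    (hn : hi - lo < fuel) (hhi : hi ≤ scores.length) :
    revLoopA scores value fuel (lo : Int) (hi : Int) = goB scores value lo hi := by
  induction fuel generalizing lo hi with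
  | zero => omega
  | succ fuel ih =>
    rw [revLoopA, goB]
    by_cases hlt : lo < hi
    · have hmid : PySem.Int.floordiv ((lo : Int) + (hi : Int)) 2 = (((lo + hi) / 2 : Nat) : Int) := by
        have : ((lo : Int) + (hi : Int)) = (((lo + hi : Nat) : Int)) := by push_cast; ring
        rw [this]; exact_mod_cast PySem.Int.floordiv_natCast (lo + hi) 2
      have hmlen : (lo + hi) / 2 < scores.length := by omega
      have hget : PySem.List.pyGet? scores (((lo + hi) / 2 : Nat) : Int)
          = some (scores.getD ((lo + hi) / 2) 0) := by
        rw [PySem.List.pyGet?_natCast, List.getElem?_eq_getElem hmlen, List.getD_eq_getElem _ _ hmlen]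
      rw [if_pos (by exact_mod_cast hlt), if_neg (by omega)]
      simp only [hmid, hget]
      by_cases hv : value > scores.getD ((lo + hi) / 2) 0
      · rw [if_pos hv, if_pos hv, ih lo ((lo + hi) / 2) (by omega) (by omega)]
      · rw [if_neg hv, if_neg hv]
        have h1 : (((lo + hi) / 2 : Nat) : Int) + 1 = (((lo + hi) / 2 + 1 : Nat) : Int) := by
          push_cast; ring
        rw [h1, ih ((lo + hi) / 2 + 1) hi (by omega) hhi]
    · rw [if_neg (by exact_mod_cast hlt), if_pos (by omega)]

-- ===== VERDICT (by name: the statement is the Claim_ definition above) =====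
theorem reverse_bisect_spec : Claim_equal_reverse_bisect := by
  intro scores value _
  unfold Spec_reverse_bisect
  have h := revLoopA_eq_goB scores value (scores.length + 1) 0 scores.length (by omega) le_rfl
  simpa [reverse_bisect, reverse_bisect_alt] using h
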